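-- pv_equiv track=rewrite | github.com/BrianYahoo/PD-SHIFT | utils/phase1_anat/step8/prepare_eeg_cap.py | name_column_index
-- ===== SOURCE A (Python) =====
-- def name_column_index(header: list[str] | None) -> int:
--     if header is None:
--         return -1
--     candidates = ["name", "label", "electrode", "channel"]
--     lowered = [h.strip().lower() for h in header]
--     for cand in candidates:
--         if cand in lowered:
--             return lowered.index(cand)
--     return 0
-- ===== SOURCE B (Python) =====
-- _RANK = {"name": 0, "label": 1, "electrode": 2, "channel": 3}
--
--
-- def name_column_index(header: list[str] | None) -> int:
--     if header is None:
--         return -1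
--     best_rank = 4
--     best_index = None
--     for i, h in enumerate(header):
--         r = _RANK.get(h.strip().lower())
--         if r is not None and r < best_rank:
--             best_rank = r
--             best_index = i
--     return 0 if best_index is None else best_index
-- ===== Notes on version B (the rewrite author's own statement) =====
-- stated objective: alternative
-- what changed: Replaces A's build-a-lowered-copy plus up-to-four membership/index scans with a single enumerate pass maintaining a running best candidate rank and the first index achieving it.
import Mathlib
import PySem

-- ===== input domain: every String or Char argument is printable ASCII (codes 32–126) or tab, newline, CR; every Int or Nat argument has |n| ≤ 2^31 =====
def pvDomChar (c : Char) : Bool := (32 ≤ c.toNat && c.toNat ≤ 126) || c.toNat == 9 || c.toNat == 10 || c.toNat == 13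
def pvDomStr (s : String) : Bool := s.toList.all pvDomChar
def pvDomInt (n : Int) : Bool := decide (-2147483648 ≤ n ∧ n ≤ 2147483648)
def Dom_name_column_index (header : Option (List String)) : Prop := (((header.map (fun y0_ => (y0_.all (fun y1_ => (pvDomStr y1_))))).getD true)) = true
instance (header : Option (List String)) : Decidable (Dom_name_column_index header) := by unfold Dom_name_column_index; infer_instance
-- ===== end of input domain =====

-- B replaces A's lowered copy plus up-to-four membership/index scans by a single pass keeping a running best candidate rank (objective: alternative).

-- ===== PORT A =====
-- the 'for cand in candidates: if cand in lowered: return lowered.index(cand)' loop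
def nciLoopA (lowered : List String) : List String → Int
  | [] => 0
  | c :: cs =>
    match PySem.List.index? lowered c with
    | some i => (i : Int)
    | none => nciLoopA lowered cs

def name_column_index (header : Option (List String)) : Int :=
  match header with
  | none => -1
  | some hs =>
    let candidates := ["name", "label", "electrode", "channel"]
    let lowered := hs.map (fun h => PySem.Str.lower (PySem.Str.strip h))
    nciLoopA lowered candidates

-- ===== PORT B =====
def nciRank : PySem.Dict String Nat :=
  PySem.Dict.ofList [("name", 0), ("label", 1), ("electrode", 2), ("channel", 3)]

-- one step of B's enumerate loop: state = (best_rank, best_index)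
def nciStep (st : Nat × Option Int) (p : Int × String) : Nat × Option Int :=
  match PySem.Dict.get? nciRank (PySem.Str.lower (PySem.Str.strip p.2)) with
  | some r => if r < st.1 then (r, some p.1) else st
  | none => st

def name_column_index_alt (header : Option (List String)) : Int :=
  match header with
  | none => -1
  | some hs =>
    match ((PySem.List.enumerate hs 0).foldl nciStep (4, none)).2 with
    | some i => i
    | none => 0

-- ===== PRECONDITION & SPEC =====
def Spec_name_column_index (header : Option (List String)) (out : Int) : Prop := out = name_column_index_alt header
instance (header : Option (List String)) (out : Int) : Decidable (Spec_name_column_index header out) := by unfold Spec_name_column_index; infer_instance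

-- ===== CLAIM (what is proved, stated in full; the proofs are below) =====
def Claim_equal_name_column_index : Prop := ∀ (header : Option (List String)), Dom_name_column_index header → Spec_name_column_index header (name_column_index header)

-- ===== LEMMAS AND PROOFS =====

-- proof-side: A's candidate chain as an Option-valued first hit
def nciChain (L : List String) : List String → Option Nat
  | [] => none
  | c :: cs =>
    match PySem.List.index? L c with
    | some j => some j
    | none => nciChain L cs

theorem nciLoopA_eq_chain (L : List String) (cs : List String) :
    nciLoopA L cs = match nciChain L cs with | some j => (j : Int) | none => 0 := by
  induction cs with
  | nil => rfl
  | cons c cs ih =>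
    simp only [nciLoopA, nciChain]
    cases PySem.List.index? L c <;> simp [ih]

theorem nciChain_nil (cs : List String) : nciChain [] cs = none := by
  induction cs with
  | nil => rfl
  | cons c cs ih => simpa [nciChain] using ih

theorem nciChain_cons_not_mem {x : String} {L : List String} {cs : List String} (hx : x ∉ cs) :
    nciChain (x :: L) cs = (nciChain L cs).map (· + 1) := by
  induction cs with
  | nil => rfl
  | cons c cs ih =>
    have hne : x ≠ c := by intro h; exact hx (h ▸ List.mem_cons_self)
    rw [nciChain, nciChain, PySem.List.index?_cons_of_ne L hne]
    cases PySem.List.index? L c with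
    | some j => rfl
    | none => simpa using ih (fun h => hx (List.mem_cons_of_mem _ h))

theorem nciChain_append (L : List String) (cs ds : List String) :
    nciChain L (cs ++ ds) =
      match nciChain L cs with | some j => some j | none => nciChain L ds := by
  induction cs with
  | nil => rfl
  | cons c cs ih =>
    simp only [List.cons_append, nciChain]
    cases PySem.List.index? L c <;> simp [ih]

theorem nciChain_cons_split {x : String} {L pre post : List String} (hpre : x ∉ pre) :
    nciChain (x :: L) (pre ++ x :: post) =
      match nciChain L pre with | some j => some (j + 1) | none => some 0 := by
  rw [nciChain_append, nciChain_cons_not_mem hpre]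
  cases nciChain L pre with
  | some j => rfl
  | none =>
    simp only [Option.map_none, nciChain, PySem.List.index?_cons_self]

-- B's fold characterised by A's chain on the lowered list
theorem nci_fold_eq_chain (t : List String) :
    ∀ (k : Int) (br : Nat) (bi : Option Int), br ≤ 4 →
    ((PySem.List.enumerate t k).foldl nciStep (br, bi)).2 =
      (match nciChain (t.map (fun h => PySem.Str.lower (PySem.Str.strip h)))
          (["name", "label", "electrode", "channel"].take br) with
       | some j => some (k + (j : Int))
       | none => bi) := by
  induction t with
  | nil => intro k br bi _; simp [PySem.List.enumerate_nil, nciChain_nil]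
  | cons h t ih =>
    intro k br bi hbr
    rw [PySem.List.enumerate_cons, List.foldl_cons, List.map_cons]
    by_cases h0 : PySem.Str.lower (PySem.Str.strip h) = "name"
    · by_cases hlt : 0 < br
      · have hstep : nciStep (br, bi) (k, h) = (0, some k) := by
          simp only [nciStep, h0]
          rw [show PySem.Dict.get? nciRank "name" = some 0 by decide]
          simp [hlt]
        rw [hstep, ih (k + 1) 0 (some k) (by omega), h0]
        interval_cases br
        · rw [show (["name", "label", "electrode", "channel"].take 1) = [] ++ "name" :: [] from rfl,
            nciChain_cons_split (by decide),
            show (["name", "label", "electrode", "channel"].take 0) = [] from rfl]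
          simp [nciChain]
        · rw [show (["name", "label", "electrode", "channel"].take 2) = [] ++ "name" :: ["label"] from rfl,
            nciChain_cons_split (by decide),
            show (["name", "label", "electrode", "channel"].take 0) = [] from rfl]
          simp [nciChain]
        · rw [show (["name", "label", "electrode", "channel"].take 3) = [] ++ "name" :: ["label", "electrode"] from rfl,
            nciChain_cons_split (by decide),
            show (["name", "label", "electrode", "channel"].take 0) = [] from rfl]
          simp [nciChain]
        · rw [show (["name", "label", "electrode", "channel"].take 4) = [] ++ "name" :: ["label", "electrode", "channel"] from rfl,
            nciChain_cons_split (by decide),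
            show (["name", "label", "electrode", "channel"].take 0) = [] from rfl]
          simp [nciChain]
      · have hstep : nciStep (br, bi) (k, h) = (br, bi) := by
          simp only [nciStep, h0]
          rw [show PySem.Dict.get? nciRank "name" = some 0 by decide]
          simp [hlt]
        rw [hstep, ih (k + 1) br bi hbr, h0]
        have hmem : "name" ∉ (["name", "label", "electrode", "channel"].take br) := by
          interval_cases br <;> decide
        rw [nciChain_cons_not_mem hmem]
        cases nciChain (t.map (fun h => PySem.Str.lower (PySem.Str.strip h))) (["name", "label", "electrode", "channel"].take br) <;> simp <;> omega
    · 
      by_cases h1 : PySem.Str.lower (PySem.Str.strip h) = "label"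
      · by_cases hlt : 1 < br
        · have hstep : nciStep (br, bi) (k, h) = (1, some k) := by
            simp only [nciStep, h1]
            rw [show PySem.Dict.get? nciRank "label" = some 1 by decide]
            simp [hlt]
          rw [hstep, ih (k + 1) 1 (some k) (by omega), h1]
          interval_cases br
          · rw [show (["name", "label", "electrode", "channel"].take 2) = ["name"] ++ "label" :: [] from rfl,
              nciChain_cons_split (by decide),
                show (["name", "label", "electrode", "channel"].take 1) = ["name"] from rfl]
            cases nciChain (t.map (fun h => PySem.Str.lower (PySem.Str.strip h))) ["name"] <;> simp <;> omega
          · rw [show (["name", "label", "electrode", "channel"].take 3) = ["name"] ++ "label" :: ["electrode"] from rfl,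
              nciChain_cons_split (by decide),
                show (["name", "label", "electrode", "channel"].take 1) = ["name"] from rfl]
            cases nciChain (t.map (fun h => PySem.Str.lower (PySem.Str.strip h))) ["name"] <;> simp <;> omega
          · rw [show (["name", "label", "electrode", "channel"].take 4) = ["name"] ++ "label" :: ["electrode", "channel"] from rfl,
              nciChain_cons_split (by decide),
                show (["name", "label", "electrode", "channel"].take 1) = ["name"] from rfl]
            cases nciChain (t.map (fun h => PySem.Str.lower (PySem.Str.strip h))) ["name"] <;> simp <;> omega
        · have hstep : nciStep (br, bi) (k, h) = (br, bi) := by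
            simp only [nciStep, h1]
            rw [show PySem.Dict.get? nciRank "label" = some 1 by decide]
            simp [hlt]
          rw [hstep, ih (k + 1) br bi hbr, h1]
          have hmem : "label" ∉ (["name", "label", "electrode", "channel"].take br) := by
            interval_cases br <;> decide
          rw [nciChain_cons_not_mem hmem]
          cases nciChain (t.map (fun h => PySem.Str.lower (PySem.Str.strip h))) (["name", "label", "electrode", "channel"].take br) <;> simp <;> omega
      · 
        by_cases h2 : PySem.Str.lower (PySem.Str.strip h) = "electrode"
        · by_cases hlt : 2 < br
          · have hstep : nciStep (br, bi) (k, h) = (2, some k) := by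
              simp only [nciStep, h2]
              rw [show PySem.Dict.get? nciRank "electrode" = some 2 by decide]
              simp [hlt]
            rw [hstep, ih (k + 1) 2 (some k) (by omega), h2]
            interval_cases br
            · rw [show (["name", "label", "electrode", "channel"].take 3) = ["name", "label"] ++ "electrode" :: [] from rfl,
                nciChain_cons_split (by decide),
                  show (["name", "label", "electrode", "channel"].take 2) = ["name", "label"] from rfl]
              cases nciChain (t.map (fun h => PySem.Str.lower (PySem.Str.strip h))) ["name", "label"] <;> simp <;> omega
            · rw [show (["name", "label", "electrode", "channel"].take 4) = ["name", "label"] ++ "electrode" :: ["channel"] from rfl,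
                nciChain_cons_split (by decide),
                  show (["name", "label", "electrode", "channel"].take 2) = ["name", "label"] from rfl]
              cases nciChain (t.map (fun h => PySem.Str.lower (PySem.Str.strip h))) ["name", "label"] <;> simp <;> omega
          · have hstep : nciStep (br, bi) (k, h) = (br, bi) := by
              simp only [nciStep, h2]
              rw [show PySem.Dict.get? nciRank "electrode" = some 2 by decide]
              simp [hlt]
            rw [hstep, ih (k + 1) br bi hbr, h2]
            have hmem : "electrode" ∉ (["name", "label", "electrode", "channel"].take br) := by
              interval_cases br <;> decide
            rw [nciChain_cons_not_mem hmem]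
            cases nciChain (t.map (fun h => PySem.Str.lower (PySem.Str.strip h))) (["name", "label", "electrode", "channel"].take br) <;> simp <;> omega
        · 
          by_cases h3 : PySem.Str.lower (PySem.Str.strip h) = "channel"
          · by_cases hlt : 3 < br
            · have hstep : nciStep (br, bi) (k, h) = (3, some k) := by
                simp only [nciStep, h3]
                rw [show PySem.Dict.get? nciRank "channel" = some 3 by decide]
                simp [hlt]
              rw [hstep, ih (k + 1) 3 (some k) (by omega), h3]
              interval_cases br
              · rw [show (["name", "label", "electrode", "channel"].take 4) = ["name", "label", "electrode"] ++ "channel" :: [] from rfl,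
                  nciChain_cons_split (by decide),
                    show (["name", "label", "electrode", "channel"].take 3) = ["name", "label", "electrode"] from rfl]
                cases nciChain (t.map (fun h => PySem.Str.lower (PySem.Str.strip h))) ["name", "label", "electrode"] <;> simp <;> omega
            · have hstep : nciStep (br, bi) (k, h) = (br, bi) := by
                simp only [nciStep, h3]
                rw [show PySem.Dict.get? nciRank "channel" = some 3 by decide]
                simp [hlt]
              rw [hstep, ih (k + 1) br bi hbr, h3]
              have hmem : "channel" ∉ (["name", "label", "electrode", "channel"].take br) := by
                interval_cases br <;> decide
              rw [nciChain_cons_not_mem hmem]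
              cases nciChain (t.map (fun h => PySem.Str.lower (PySem.Str.strip h))) (["name", "label", "electrode", "channel"].take br) <;> simp <;> omega
          · have hget : PySem.Dict.get? nciRank (PySem.Str.lower (PySem.Str.strip h)) = none := by
              rw [show nciRank = PySem.Dict.mk
                    [("name", 0), ("label", 1), ("electrode", 2), ("channel", 3)] from rfl]
              simp only [PySem.Dict.get?_mk_cons, beq_iff_eq]
              rw [if_neg (fun hq => h0 hq.symm), if_neg (fun hq => h1 hq.symm),
                if_neg (fun hq => h2 hq.symm), if_neg (fun hq => h3 hq.symm)]
              rfl
            have hstep : nciStep (br, bi) (k, h) = (br, bi) := by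
              simp only [nciStep, hget]
            rw [hstep, ih (k + 1) br bi hbr]
            have hmem : PySem.Str.lower (PySem.Str.strip h) ∉ (["name", "label", "electrode", "channel"].take br) := by
              have hsub := List.take_subset br ["name", "label", "electrode", "channel"]
              intro hm
              have hx := hsub hm
              simp only [List.mem_cons, List.not_mem_nil, or_false] at hx
              rcases hx with hq | hq | hq | hq
              · exact h0 hq
              · exact h1 hq
              · exact h2 hq
              · exact h3 hq
            rw [nciChain_cons_not_mem hmem]
            cases nciChain (t.map (fun h => PySem.Str.lower (PySem.Str.strip h))) (["name", "label", "electrode", "channel"].take br) <;> simp <;> omega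

-- ===== VERDICT (by name: the statement is the Claim_ definition above) =====
theorem name_column_index_spec : Claim_equal_name_column_index := by
  intro header _
  unfold Spec_name_column_index name_column_index name_column_index_alt
  cases header with
  | none => rfl
  | some hs =>
    simp only [nciLoopA_eq_chain]
    rw [nci_fold_eq_chain hs 0 4 none (le_refl 4),
      show (["name", "label", "electrode", "channel"].take 4) =
        ["name", "label", "electrode", "channel"] from rfl]
    cases nciChain (hs.map (fun h => PySem.Str.lower (PySem.Str.strip h)))
        ["name", "label", "electrode", "channel"] <;> simp
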